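-- pv_equiv track=rewrite | github.com/SullyJHF/advent-of-code-2021 | 18.py | do_what
-- ===== SOURCE A (Python) =====
-- def do_what(snailfish):
--     string_fish = str(snailfish).replace(' ', '')
--     depth = 0
--     for i, char in enumerate(string_fish):
--         if char == '[':
--             depth += 1
--             continue
--         elif char == ']':
--             depth -= 1
--             continue
--         elif char == ',':
--             continue
--         if depth == 5:
--             return 'explode'
--
--     last_char = None
--     for i, char in enumerate(string_fish):
--         if char.isnumeric():
--             if last_char and last_char.isnumeric():
--                 return 'split'
--             last_char = char
--         else:
--             last_char = None
--     return 'nothing'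
-- ===== SOURCE B (Python) =====
-- def do_what(snailfish):
--     s = str(snailfish).replace(' ', '')
--     depth = 0
--     last_digit = False
--     split_seen = False
--     for char in s:
--         if char == '[':
--             depth += 1
--             last_digit = False
--         elif char == ']':
--             depth -= 1
--             last_digit = False
--         elif char == ',':
--             last_digit = False
--         elif depth == 5:
--             return 'explode'
--         elif char.isnumeric():
--             if last_digit:
--                 split_seen = True
--             last_digit = True
--         else:
--             last_digit = False
--     return 'split' if split_seen else 'nothing'
-- ===== Notes on version B (the rewrite author's own statement) =====
-- stated objective: alternative
-- what changed: Replaces A's two full passes (one for explode, one for split) by a single interleaved pass maintaining depth, a last-char-was-digit flag and a deferred split_seen flag, so the string is scanned at most once.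
import Mathlib
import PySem

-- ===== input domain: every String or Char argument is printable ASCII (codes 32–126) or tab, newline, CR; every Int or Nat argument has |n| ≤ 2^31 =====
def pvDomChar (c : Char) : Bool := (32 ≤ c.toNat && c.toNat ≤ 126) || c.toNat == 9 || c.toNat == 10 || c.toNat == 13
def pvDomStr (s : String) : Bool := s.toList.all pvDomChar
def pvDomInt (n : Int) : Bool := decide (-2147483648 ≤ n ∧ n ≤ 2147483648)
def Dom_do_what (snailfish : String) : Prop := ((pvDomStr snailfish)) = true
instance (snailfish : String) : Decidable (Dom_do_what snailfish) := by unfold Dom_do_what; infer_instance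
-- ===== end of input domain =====

-- B replaces A's two full passes by one interleaved pass with a deferred split flag (single scan, same results).

-- shared: str(snailfish).replace(' ', '') as a char list (str() is identity on a str)
def dwClean (s : String) : List Char := PySem.Chars.replace s.toList [' '] []

-- ===== PORT A =====
-- first loop of A: on any char other than '[' ']' ',' check depth == 5
def dwLoop1 : List Char → Int → Option String
  | [], _ => none
  | c :: rest, depth =>
    if c = '[' then dwLoop1 rest (depth + 1)
    else if c = ']' then dwLoop1 rest (depth - 1)
    else if c = ',' then dwLoop1 rest depth
    else if depth = 5 then some "explode" else dwLoop1 rest depth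

-- second loop of A: last_char tracking ('char.isnumeric()' = isdigit on the ASCII domain)
def dwLoop2 : List Char → Option Char → Option String
  | [], _ => none
  | c :: rest, last =>
    if PySem.Chars.isdigit c then
      if (match last with | some l => PySem.Chars.isdigit l | none => false) then some "split"
      else dwLoop2 rest (some c)
    else dwLoop2 rest none

def do_what (snailfish : String) : String :=
  let cs := dwClean snailfish
  match dwLoop1 cs 0 with
  | some r => r
  | none => (dwLoop2 cs none).getD "nothing"

-- ===== PORT B =====
-- single pass: depth, last-char-was-digit flag, deferred split_seen flag
def dwScan : List Char → Int → Bool → Bool → String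
  | [], _, _, seen => if seen then "split" else "nothing"
  | c :: rest, depth, lastD, seen =>
    if c = '[' then dwScan rest (depth + 1) false seen
    else if c = ']' then dwScan rest (depth - 1) false seen
    else if c = ',' then dwScan rest depth false seen
    else if depth = 5 then "explode"
    else if PySem.Chars.isdigit c then dwScan rest depth true (seen || lastD)
    else dwScan rest depth false seen

def do_what_alt (snailfish : String) : String :=
  dwScan (dwClean snailfish) 0 false false

-- ===== PRECONDITION & SPEC =====
def Spec_do_what (snailfish : String) (out : String) : Prop := out = do_what_alt snailfish
instance (snailfish : String) (out : String) : Decidable (Spec_do_what snailfish out) := by unfold Spec_do_what; infer_instance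

-- ===== CLAIM (what is proved, stated in full; the proofs are below) =====
def Claim_equal_do_what : Prop := ∀ (snailfish : String), Dom_do_what snailfish → Spec_do_what snailfish (do_what snailfish)

-- ===== LEMMAS AND PROOFS =====

-- digitness of A's last_char, which is all B's flag keeps
def dwDigitOpt : Option Char → Bool
  | some l => PySem.Chars.isdigit l
  | none => false

-- the single pass equals: result of loop 1 if it fires, else loop 2 (or 'split' if already seen)
theorem dwScan_eq (cs : List Char) : ∀ (depth : Int) (lastD seen : Bool) (last : Option Char),
    dwDigitOpt last = lastD →
    dwScan cs depth lastD seen =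
      match dwLoop1 cs depth with
      | some r => r
      | none => if seen then "split" else (dwLoop2 cs last).getD "nothing" := by
  induction cs with
  | nil =>
    intro depth lastD seen last _
    simp [dwScan, dwLoop1, dwLoop2]
  | cons c rest ih =>
    intro depth lastD seen last hlast
    by_cases h1 : c = '['
    · subst h1
      simp only [dwScan, dwLoop1, dwLoop2, if_pos rfl]
      have : PySem.Chars.isdigit '[' = false := by decide
      rw [this]
      simpa using ih (depth + 1) false seen none rfl
    · by_cases h2 : c = ']'
      · subst h2
        simp only [dwScan, dwLoop1, dwLoop2]
        have : PySem.Chars.isdigit ']' = false := by decide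
        rw [this]
        simp only [if_neg h1, if_pos rfl, if_neg (by decide : ¬(']' = '['))]
        simpa using ih (depth - 1) false seen none rfl
      · by_cases h3 : c = ','
        · subst h3
          simp only [dwScan, dwLoop1, dwLoop2]
          have : PySem.Chars.isdigit ',' = false := by decide
          rw [this]
          simp only [if_neg h1, if_neg h2, if_pos rfl,
            if_neg (by decide : ¬(',' = '[')), if_neg (by decide : ¬(',' = ']'))]
          simpa using ih depth false seen none rfl
        · simp only [dwScan, dwLoop1, dwLoop2, if_neg h1, if_neg h2, if_neg h3]
          by_cases h5 : depth = 5
          · simp [h5]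
          · simp only [if_neg h5]
            by_cases hd : PySem.Chars.isdigit c
            · simp only [hd, if_pos rfl]
              cases hl : lastD with
              | true =>
                -- last was a digit: loop 2 returns split; B just records it
                rw [hl] at hlast
                cases last with
                | none => simp [dwDigitOpt] at hlast
                | some l =>
                  simp only [dwDigitOpt] at hlast
                  simp only [hlast, Bool.or_true, if_true]
                  rw [ih depth true true (some c) (by simp [dwDigitOpt, hd])]
                  cases dwLoop1 rest depth <;> simp
              | false =>
                rw [hl] at hlast
                simp only [if_true, Bool.or_false]
                rw [ih depth true seen (some c) (by simp [dwDigitOpt, hd])]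
                cases last with
                | none => simp
                | some l =>
                  simp only [dwDigitOpt] at hlast
                  simp [hlast]
            · simp only [hd, if_neg (by simp [hd] : ¬(PySem.Chars.isdigit c = true))]
              simpa using ih depth false seen none rfl

-- ===== VERDICT (by name: the statement is the Claim_ definition above) =====
theorem do_what_spec : Claim_equal_do_what := by
  intro snailfish _
  unfold Spec_do_what do_what do_what_alt
  rw [dwScan_eq (dwClean snailfish) 0 false false none rfl]
  simp
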